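-- pv_equiv track=rewrite | github.com/ryanwhite04/exams | 2015.py | marksDistribution
-- ===== SOURCE A (Python) =====
-- def marksDistribution(marks):
--     def count(marks, mini, maxi):
--         return len([n for n, mark in marks.items() if mini <= mark <= maxi])
--     return {
--         '0-20': count(marks, 0, 20),
--         '21-40': count(marks, 21, 40),
--         '41-60': count(marks, 41, 60),
--         '61-80': count(marks, 61, 80),
--         '81-100': count(marks, 81, 100),
--     }
-- ===== SOURCE B (Python) =====
-- def marksDistribution(marks):
--     result = {'0-20': 0, '21-40': 0, '41-60': 0, '61-80': 0, '81-100': 0}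
--     for mark in marks.values():
--         if 0 <= mark <= 20:
--             result['0-20'] += 1
--         elif 21 <= mark <= 40:
--             result['21-40'] += 1
--         elif 41 <= mark <= 60:
--             result['41-60'] += 1
--         elif 61 <= mark <= 80:
--             result['61-80'] += 1
--         elif 81 <= mark <= 100:
--             result['81-100'] += 1
--     return result
-- ===== Notes on version B (the rewrite author's own statement) =====
-- stated objective: alternative
-- what changed: Replaces five full scans of the dict (one per range) with a single pass that dispatches each mark to its bucket via an if/elif chain over the same inclusive bounds.
import Mathlib
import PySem

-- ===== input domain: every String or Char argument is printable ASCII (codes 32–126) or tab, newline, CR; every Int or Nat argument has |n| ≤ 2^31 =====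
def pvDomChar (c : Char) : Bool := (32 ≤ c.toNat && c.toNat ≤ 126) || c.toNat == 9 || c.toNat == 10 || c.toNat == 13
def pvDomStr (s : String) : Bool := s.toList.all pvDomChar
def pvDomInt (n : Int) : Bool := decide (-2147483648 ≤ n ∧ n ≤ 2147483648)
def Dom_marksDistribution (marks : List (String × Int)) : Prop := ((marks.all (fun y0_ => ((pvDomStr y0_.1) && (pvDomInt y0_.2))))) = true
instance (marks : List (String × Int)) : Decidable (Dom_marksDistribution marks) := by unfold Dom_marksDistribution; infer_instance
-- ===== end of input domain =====

-- B replaces A's five full scans (one per range) with a single pass dispatching each mark to its bucket; objective: alternative decomposition.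

-- ===== PORT A =====
-- A's helper: len([n for n, mark in marks.items() if mini <= mark <= maxi])
def pvCount (marks : List (String × Int)) (mini maxi : Int) : Int :=
  ((marks.filter (fun p => decide (mini ≤ p.2 ∧ p.2 ≤ maxi))).length : Int)

def marksDistribution (marks : List (String × Int)) : List (String × Int) :=
  [("0-20", pvCount marks 0 20),
   ("21-40", pvCount marks 21 40),
   ("41-60", pvCount marks 41 60),
   ("61-80", pvCount marks 61 80),
   ("81-100", pvCount marks 81 100)]

-- ===== PORT B =====
-- one pass over the marks, if/elif dispatch incrementing the matching bucket of the 5-counter state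
def pvStep (s : Int × Int × Int × Int × Int) (m : Int) : Int × Int × Int × Int × Int :=
  if 0 ≤ m ∧ m ≤ 20 then (s.1 + 1, s.2.1, s.2.2.1, s.2.2.2.1, s.2.2.2.2)
  else if 21 ≤ m ∧ m ≤ 40 then (s.1, s.2.1 + 1, s.2.2.1, s.2.2.2.1, s.2.2.2.2)
  else if 41 ≤ m ∧ m ≤ 60 then (s.1, s.2.1, s.2.2.1 + 1, s.2.2.2.1, s.2.2.2.2)
  else if 61 ≤ m ∧ m ≤ 80 then (s.1, s.2.1, s.2.2.1, s.2.2.2.1 + 1, s.2.2.2.2)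
  else if 81 ≤ m ∧ m ≤ 100 then (s.1, s.2.1, s.2.2.1, s.2.2.2.1, s.2.2.2.2 + 1)
  else s

def marksDistribution_alt (marks : List (String × Int)) : List (String × Int) :=
  let c := (marks.map Prod.snd).foldl pvStep (0, 0, 0, 0, 0)
  [("0-20", c.1), ("21-40", c.2.1), ("41-60", c.2.2.1), ("61-80", c.2.2.2.1), ("81-100", c.2.2.2.2)]

-- ===== PRECONDITION & SPEC =====
def Spec_marksDistribution (marks : List (String × Int)) (out : List (String × Int)) : Prop := out = marksDistribution_alt marks
instance (marks : List (String × Int)) (out : List (String × Int)) : Decidable (Spec_marksDistribution marks out) := by unfold Spec_marksDistribution; infer_instance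

-- ===== CLAIM (what is proved, stated in full; the proofs are below) =====
def Claim_equal_marksDistribution : Prop := ∀ (marks : List (String × Int)), Dom_marksDistribution marks → Spec_marksDistribution marks (marksDistribution marks)

-- ===== LEMMAS AND PROOFS =====
-- loop invariant: folding pvStep adds the five range counts to the starting counters
set_option maxHeartbeats 1000000 in
theorem pvStep_foldl (ms : List Int) (s : Int × Int × Int × Int × Int) :
    ms.foldl pvStep s =
      (s.1 + ((ms.filter (fun m => decide (0 ≤ m ∧ m ≤ 20))).length : Int),
       s.2.1 + ((ms.filter (fun m => decide (21 ≤ m ∧ m ≤ 40))).length : Int),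
       s.2.2.1 + ((ms.filter (fun m => decide (41 ≤ m ∧ m ≤ 60))).length : Int),
       s.2.2.2.1 + ((ms.filter (fun m => decide (61 ≤ m ∧ m ≤ 80))).length : Int),
       s.2.2.2.2 + ((ms.filter (fun m => decide (81 ≤ m ∧ m ≤ 100))).length : Int)) := by
  induction ms generalizing s with
  | nil => simp
  | cons m ms ih =>
    obtain ⟨a, b, c, d, e⟩ := s
    rw [List.foldl_cons, ih]
    simp only [List.filter_cons, decide_eq_true_eq]
    unfold pvStep
    split_ifs with h1 h2 h3 h4 h5 <;> simp <;> omega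

theorem pvCount_eq_filter_snd (marks : List (String × Int)) (a b : Int) :
    pvCount marks a b = (((marks.map Prod.snd).filter (fun m => decide (a ≤ m ∧ m ≤ b))).length : Int) := by
  simp [pvCount, List.filter_map, List.length_map, Function.comp_def]

-- ===== VERDICT (by name: the statement is the Claim_ definition above) =====
theorem marksDistribution_spec : Claim_equal_marksDistribution := by
  intro marks _
  unfold Spec_marksDistribution marksDistribution marksDistribution_alt
  simp only [pvStep_foldl, pvCount_eq_filter_snd, zero_add]
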